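-- pv_equiv track=rewrite | github.com/ParkerCase/KiHealth | pubmed-literature-mining/scripts/compare_and_scrape_new.py | _is_usable_with_justification
-- ===== SOURCE A (Python) =====
-- from typing import List, Set, Dict
--
-- def _is_usable_with_justification(assessment: Dict) -> bool:
--     """Check if article is usable with justification (same as fix_probast_system)"""
--     if not assessment:
--         return False
--
--     domain_1 = (assessment.get("domain_1_participants", "") or "").lower()
--     domain_2 = (assessment.get("domain_2_predictors", "") or "").lower()
--     domain_3 = (assessment.get("domain_3_outcome", "") or "").lower()
--     domain_4 = (assessment.get("domain_4_analysis", "") or "").lower()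
--
--     domains = [domain_1, domain_2, domain_3, domain_4]
--     low_count = sum(1 for d in domains if d == "low")
--     moderate_count = sum(1 for d in domains if d == "moderate")
--     high_count = sum(1 for d in domains if d == "high")
--
--     # All Low = Usable
--     if low_count == 4:
--         return True
--
--     # 3 Low + 1 Moderate = Usable
--     if low_count == 3 and moderate_count == 1:
--         return True
--
--     # 2 Low + 2 Moderate = Usable
--     if low_count == 2 and moderate_count == 2:
--         return True
--
--     # No High Risk domains
--     if high_count == 0:
--         if low_count >= 1 and moderate_count >= 3:
--             return True
--
--     return False
-- ===== SOURCE B (Python) =====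
-- def _is_usable_with_justification(assessment) -> bool:
--     """Usable iff every domain risk is 'low' or 'moderate' and at least one is 'low'."""
--     if not assessment:
--         return False
--
--     domains = [
--         (assessment.get(key, "") or "").lower()
--         for key in (
--             "domain_1_participants",
--             "domain_2_predictors",
--             "domain_3_outcome",
--             "domain_4_analysis",
--         )
--     ]
--
--     return all(d in ("low", "moderate") for d in domains) and any(d == "low" for d in domains)
-- ===== Notes on version B (the rewrite author's own statement) =====
-- stated objective: simpler
-- what changed: Replaces the three per-label counts and the four-case count-combination ladder with a single membership predicate: usable iff all four domains are 'low'/'moderate' and at least one is 'low'.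
import Mathlib
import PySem

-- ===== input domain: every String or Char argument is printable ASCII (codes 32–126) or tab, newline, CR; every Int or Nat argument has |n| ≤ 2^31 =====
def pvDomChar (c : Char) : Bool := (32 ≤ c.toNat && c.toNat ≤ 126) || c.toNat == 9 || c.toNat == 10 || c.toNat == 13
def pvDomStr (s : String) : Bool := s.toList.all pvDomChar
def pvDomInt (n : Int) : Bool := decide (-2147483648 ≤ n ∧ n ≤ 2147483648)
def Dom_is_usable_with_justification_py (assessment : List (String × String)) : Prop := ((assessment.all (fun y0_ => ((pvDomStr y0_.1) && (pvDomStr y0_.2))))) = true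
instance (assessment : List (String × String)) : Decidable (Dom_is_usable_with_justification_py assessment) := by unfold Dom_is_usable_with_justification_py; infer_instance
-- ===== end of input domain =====

-- B replaces A's three label counts and four-case count ladder by a single membership
-- predicate (all domains low/moderate, at least one low); objective: simpler.

-- shared normalization, identical in both Pythons: (assessment.get(key, "") or "").lower()
def pvNorm (assessment : List (String × String)) (key : String) : String :=
  let s := (PySem.Dict.mk assessment).getD key ""
  PySem.Str.lower (if s == "" then "" else s)   -- 's or ""' with a string s

-- ===== PORT A =====
def is_usable_with_justification_py (assessment : List (String × String)) : Bool :=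
  if assessment.isEmpty then false
  else
    let domain_1 := pvNorm assessment "domain_1_participants"
    let domain_2 := pvNorm assessment "domain_2_predictors"
    let domain_3 := pvNorm assessment "domain_3_outcome"
    let domain_4 := pvNorm assessment "domain_4_analysis"
    let domains := [domain_1, domain_2, domain_3, domain_4]
    let low_count : Nat := domains.foldl (fun acc d => if d == "low" then acc + 1 else acc) 0
    let moderate_count : Nat := domains.foldl (fun acc d => if d == "moderate" then acc + 1 else acc) 0
    let high_count : Nat := domains.foldl (fun acc d => if d == "high" then acc + 1 else acc) 0
    if low_count == 4 then true
    else if low_count == 3 && moderate_count == 1 then true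
    else if low_count == 2 && moderate_count == 2 then true
    else if high_count == 0 then
      (if 1 ≤ low_count && 3 ≤ moderate_count then true else false)
    else false

-- ===== PORT B =====
def is_usable_with_justification_py_alt (assessment : List (String × String)) : Bool :=
  if assessment.isEmpty then false
  else
    let domains := ["domain_1_participants", "domain_2_predictors",
                    "domain_3_outcome", "domain_4_analysis"].map (pvNorm assessment)
    domains.all (fun d => d == "low" || d == "moderate") && domains.any (fun d => d == "low")

-- ===== PRECONDITION & SPEC =====
def Spec_is_usable_with_justification_py (assessment : List (String × String)) (out : Bool) : Prop := out = is_usable_with_justification_py_alt assessment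
instance (assessment : List (String × String)) (out : Bool) : Decidable (Spec_is_usable_with_justification_py assessment out) := by unfold Spec_is_usable_with_justification_py; infer_instance

-- ===== CLAIM (what is proved, stated in full; the proofs are below) =====
def Claim_equal_is_usable_with_justification_py : Prop := ∀ (assessment : List (String × String)), Dom_is_usable_with_justification_py assessment → Spec_is_usable_with_justification_py assessment (is_usable_with_justification_py assessment)

-- ===== LEMMAS AND PROOFS =====

-- the whole equivalence, once the four normalized strings are abstracted:
-- counting ladder = membership predicate, for any four strings
theorem pv_tri (d : String) :
    d = "low" ∨ d = "moderate" ∨ ((d == "low") = false ∧ (d == "moderate") = false) := by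
  by_cases h1 : d = "low"
  · exact Or.inl h1
  by_cases h2 : d = "moderate"
  · exact Or.inr (Or.inl h2)
  exact Or.inr (Or.inr ⟨by simp [h1], by simp [h2]⟩)

theorem pv_core (d1 d2 d3 d4 : String) :
    (let domains := [d1, d2, d3, d4]
     let low_count : Nat := domains.foldl (fun acc d => if d == "low" then acc + 1 else acc) 0
     let moderate_count : Nat := domains.foldl (fun acc d => if d == "moderate" then acc + 1 else acc) 0
     let high_count : Nat := domains.foldl (fun acc d => if d == "high" then acc + 1 else acc) 0
     if low_count == 4 then true
     else if low_count == 3 && moderate_count == 1 then true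
     else if low_count == 2 && moderate_count == 2 then true
     else if high_count == 0 then
       (if 1 ≤ low_count && 3 ≤ moderate_count then true else false)
     else false)
    =
    ([d1, d2, d3, d4].all (fun d => d == "low" || d == "moderate")
      && [d1, d2, d3, d4].any (fun d => d == "low")) := by
  rcases pv_tri d1 with rfl | rfl | ⟨p1, q1⟩ <;>
    rcases pv_tri d2 with rfl | rfl | ⟨p2, q2⟩ <;>
      rcases pv_tri d3 with rfl | rfl | ⟨p3, q3⟩ <;>
        rcases pv_tri d4 with rfl | rfl | ⟨p4, q4⟩ <;>
          simp_all

-- ===== VERDICT (by name: the statement is the Claim_ definition above) =====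
theorem is_usable_with_justification_py_spec : Claim_equal_is_usable_with_justification_py := by
  intro assessment _
  unfold Spec_is_usable_with_justification_py
  unfold is_usable_with_justification_py is_usable_with_justification_py_alt
  by_cases h : assessment.isEmpty
  · simp [h]
  · simp only [h, if_neg, Bool.false_eq_true, not_false_eq_true, List.map]
    exact pv_core _ _ _ _
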